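-- pv_equiv track=rewrite | github.com/PGatak/basics | machine_learning/funkcja_aktywacji_neuronu.py | progowa_unipolarna
-- ===== SOURCE A (Python) =====
-- def progowa_unipolarna(lst):
--     lst.sort()
--     results = []
--     for i in lst:
--         if i > 0:
--             result = 1
--         else:
--             result = 0
--         results.append(result)
--     return results
-- ===== SOURCE B (Python) =====
-- def progowa_unipolarna(lst):
--     k = sum(1 for x in lst if x <= 0)
--     return [0] * k + [1] * (len(lst) - k)
-- ===== Notes on version B (the rewrite author's own statement) =====
-- stated objective: alternative
-- what changed: B replaces sort-then-map with a single counting pass: count the non-positive elements k and build the answer as k zeros followed by the remaining ones.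
import Mathlib
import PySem

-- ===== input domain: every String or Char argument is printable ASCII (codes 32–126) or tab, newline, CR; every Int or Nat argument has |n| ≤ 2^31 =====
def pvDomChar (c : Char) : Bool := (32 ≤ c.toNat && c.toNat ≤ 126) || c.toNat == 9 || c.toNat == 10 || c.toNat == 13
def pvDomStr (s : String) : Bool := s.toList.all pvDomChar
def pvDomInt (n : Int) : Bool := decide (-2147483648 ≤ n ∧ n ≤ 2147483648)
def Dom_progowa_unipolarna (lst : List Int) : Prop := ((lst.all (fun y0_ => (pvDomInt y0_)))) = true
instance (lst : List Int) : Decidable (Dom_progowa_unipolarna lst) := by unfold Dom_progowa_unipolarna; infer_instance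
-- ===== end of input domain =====

-- ===== PORT A =====
-- Note: Python A sorts lst in place (caller-visible mutation); the equivalence proved here is about the return value.
def progowa_unipolarna (lst : List Int) : List Int :=
  (PySem.List.sorted lst (fun x => x) false).foldl
    (fun results i => results ++ [if i > 0 then (1 : Int) else 0]) []

-- ===== PORT B =====
-- B: count non-positive elements, emit [0]*k ++ [1]*(n-k)
def progowa_unipolarna_alt (lst : List Int) : List Int :=
  let k := lst.countP (fun x => decide (x ≤ 0))
  List.replicate k 0 ++ List.replicate (lst.length - k) 1

-- ===== PRECONDITION & SPEC =====
def Spec_progowa_unipolarna (lst : List Int) (out : List Int) : Prop := out = progowa_unipolarna_alt lst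
instance (lst : List Int) (out : List Int) : Decidable (Spec_progowa_unipolarna lst out) := by unfold Spec_progowa_unipolarna; infer_instance

-- ===== CLAIM (what is proved, stated in full; the proofs are below) =====
def Claim_equal_progowa_unipolarna : Prop := ∀ (lst : List Int), Dom_progowa_unipolarna lst → Spec_progowa_unipolarna lst (progowa_unipolarna lst)

-- ===== LEMMAS AND PROOFS =====

-- ===== VERDICT (by name: the statement is the Claim_ definition above) =====

theorem pv_foldl_append (s : List Int) (acc : List Int) :
    s.foldl (fun results i => results ++ [if i > 0 then (1 : Int) else 0]) acc
      = acc ++ s.map (fun i => if i > 0 then (1 : Int) else 0) := by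
  induction s generalizing acc with
  | nil => simp
  | cons a t ih => simp [List.foldl, ih]

theorem pv_map_sorted (s : List Int) (hs : s.Pairwise (· ≤ ·)) :
    s.map (fun i => if i > 0 then (1 : Int) else 0)
      = List.replicate (s.countP (fun x => decide (x ≤ 0))) 0
        ++ List.replicate (s.countP (fun x => decide (0 < x))) 1 := by
  induction s with
  | nil => simp
  | cons a t ih =>
    rcases hs with _ | ⟨ha, ht⟩
    by_cases h : 0 < a
    · have hz : t.countP (fun x => decide (x ≤ 0)) = 0 := by
        rw [List.countP_eq_zero]
        intro x hx
        simp only [decide_eq_true_eq]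
        exact not_le.mpr (lt_of_lt_of_le h (ha x hx))
      simp only [List.map_cons, List.countP_cons, ih ht]
      simp [h, not_le.mpr h, hz, List.replicate_succ]
    · simp only [List.map_cons, List.countP_cons, ih ht]
      simp [h, not_lt.mp h, List.replicate_succ]

theorem pv_count_split (l : List Int) :
    l.length - l.countP (fun x => decide (x ≤ 0)) = l.countP (fun x => decide (0 < x)) := by
  induction l with
  | nil => simp
  | cons a t ih =>
    have hc := List.countP_le_length (l := t) (p := fun x => decide (x ≤ 0))
    by_cases h : a ≤ 0
    · simp only [List.countP_cons, List.length_cons, h, not_lt.mpr h]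
      simp
      omega
    · simp only [List.countP_cons, List.length_cons, h, not_le.mp h]
      simp
      omega

theorem progowa_unipolarna_spec : Claim_equal_progowa_unipolarna := by
  intro lst _
  unfold Spec_progowa_unipolarna progowa_unipolarna progowa_unipolarna_alt
  rw [pv_foldl_append, List.nil_append,
    pv_map_sorted _ (PySem.List.sorted_pairwise (key := fun x : Int => x) (xs := lst))]
  have hperm := PySem.List.sorted_perm (xs := lst) (key := fun x : Int => x) (rev := false)
  rw [hperm.countP_eq, hperm.countP_eq, ← pv_count_split]
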